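-- pv_equiv track=rewrite | github.com/Minseojeonn/Programmers_CT | 백준/Gold/14502. 연구소/연구소.py | bfs
-- ===== SOURCE A (Python) =====
-- import copy
--
-- def bfs(maps, walls):
--     visited = copy.deepcopy(maps)
--     for wall in walls:
--         visited[wall[0]][wall[1]] = 1
--
--     for idx, i in enumerate(visited):
--         for jdx, j in enumerate(i):
--             if visited[idx][jdx] == 2:
--                 stack = [(idx, jdx)]
--                 while stack:
--                     now_pos_y, now_pos_x = stack.pop()
--                     for dy, dx in zip([0,0,-1,1],[-1,1,0,0]):
--                         candid_y = now_pos_y + dy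
--                         candid_x = now_pos_x + dx
--                         if 0 <= candid_y < len(maps) and 0 <= candid_x < len(maps[0]):
--                             if visited[candid_y][candid_x] == 0:
--                                 stack.append((candid_y, candid_x))
--                                 visited[candid_y][candid_x] = 2
--     safe_zone = 0
--     for i in visited:
--         for j in i:
--             if j == 0:
--                 safe_zone += 1
--
--     return safe_zone
-- ===== SOURCE B (Python) =====
-- def bfs(maps, walls):
--     visited = [row[:] for row in maps]
--     for wall in walls:
--         visited[wall[0]][wall[1]] = 1
--     H = len(maps)
--     W = len(maps[0]) if maps else 0
--     queue = [(y, x) for y in range(H) for x in range(W) if visited[y][x] == 2]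
--     i = 0
--     while i < len(queue):
--         y, x = queue[i]
--         i += 1
--         for dy, dx in ((0, -1), (0, 1), (-1, 0), (1, 0)):
--             ny, nx = y + dy, x + dx
--             if 0 <= ny < H and 0 <= nx < W and visited[ny][nx] == 0:
--                 visited[ny][nx] = 2
--                 queue.append((ny, nx))
--     return sum(1 for row in visited for c in row if c == 0)
-- ===== Notes on version B (the rewrite author's own statement) =====
-- stated objective: alternative
-- what changed: Replaces A's grid-wide rescans that restart an explicit-stack DFS at every virus cell with a single multi-source BFS: all virus cells are collected once into one queue walked by an index pointer, and safe cells are counted with a generator sum.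
-- outside the precondition, e.g. on bfs([[0], [0, 2]], []): A returns 0, B returns 2; on bfs([[0], [0, 0]], []): A returns 3, B returns 3
import Mathlib
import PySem

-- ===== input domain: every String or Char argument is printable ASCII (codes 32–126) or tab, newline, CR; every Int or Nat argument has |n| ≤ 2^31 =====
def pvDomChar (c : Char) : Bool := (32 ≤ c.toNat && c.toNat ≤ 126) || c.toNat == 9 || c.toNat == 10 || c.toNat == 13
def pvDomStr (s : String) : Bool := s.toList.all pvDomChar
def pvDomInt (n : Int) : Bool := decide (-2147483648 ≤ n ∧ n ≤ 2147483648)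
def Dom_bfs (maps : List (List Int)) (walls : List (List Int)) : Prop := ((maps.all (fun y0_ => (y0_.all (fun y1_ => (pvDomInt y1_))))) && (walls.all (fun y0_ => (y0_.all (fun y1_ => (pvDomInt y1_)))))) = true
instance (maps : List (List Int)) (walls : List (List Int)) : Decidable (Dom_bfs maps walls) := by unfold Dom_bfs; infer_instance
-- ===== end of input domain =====

-- B replaces A's per-cell restarted explicit-stack DFS with one multi-source BFS queue walked by an
-- index pointer (objective: alternative decomposition, same asymptotic cost).

-- ===== PORT A =====
-- shared small helpers (identical Python lines in A and B: wall placement and grid indexing)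

-- Python index normalization for `seq[i] = v`: negative i counts from the end; none = IndexError
-- (inputs reaching none are excluded by Pre_bfs). Exact on its stated domain.
def pvNorm (n : Nat) (i : Int) : Option Nat :=
  if 0 ≤ i then (if i < (n : Int) then some i.toNat else none)
  else (if 0 ≤ i + (n : Int) then some (i + (n : Int)).toNat else none)

-- visited[y][x] (chained subscripts); none where Python raises IndexError
def pvGet2 (g : List (List Int)) (y x : Int) : Option Int :=
  (PySem.List.pyGet? g y).bind fun row => PySem.List.pyGet? row x

-- visited[y][x] = a ; where Python would raise IndexError (outside Pre_bfs) the grid is returned unchanged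
def pvSet2 (g : List (List Int)) (y x : Int) (a : Int) : List (List Int) :=
  match pvNorm g.length y with
  | none => g
  | some yi =>
    match pvNorm (g.getD yi []).length x with
    | none => g
    | some xi => g.set yi ((g.getD yi []).set xi a)

-- `for wall in walls: visited[wall[0]][wall[1]] = 1`
def pvPlaceWalls (g : List (List Int)) (walls : List (List Int)) : List (List Int) :=
  walls.foldl (fun v w =>
    match PySem.List.pyGet? w 0, PySem.List.pyGet? w 1 with
    | some a, some b => pvSet2 v a b 1
    | _, _ => v) g

-- number of 0 cells (used only as provably-sufficient fuel for the while loops)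
def pvZeros (g : List (List Int)) : Nat := (g.map (fun r => r.count 0)).sum

-- zip([0,0,-1,1],[-1,1,0,0])
def pvDirs : List (Int × Int) := [(0, -1), (0, 1), (-1, 0), (1, 0)]

-- body of A's `for dy, dx in zip(...)` over the state (visited, stack)
def bfsStep (H W y x : Int) (st : List (List Int) × List (Int × Int)) (d : Int × Int) :
    List (List Int) × List (Int × Int) :=
  let cy := y + d.1
  let cx := x + d.2
  if 0 ≤ cy ∧ cy < H ∧ 0 ≤ cx ∧ cx < W then
    match pvGet2 st.1 cy cx with
    | some 0 => (pvSet2 st.1 cy cx 2, (cy, cx) :: st.2)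
    | _ => st
  else st

-- A's `while stack:`; stack head = Python list tail (`pop()`/`append` at the end); fuel is
-- 2*(number of 0 cells)+stack length+1, provably enough, guarding totality only
def bfsLoop (H W : Int) : Nat → List (List Int) → List (Int × Int) → List (List Int)
  | 0, v, _ => v
  | _ + 1, v, [] => v
  | fuel + 1, v, (y, x) :: rest =>
    let st := pvDirs.foldl (bfsStep H W y x) (v, rest)
    bfsLoop H W fuel st.1 st.2

-- A's outer `for idx, i in enumerate(visited): for jdx, j in enumerate(i): if visited[idx][jdx] == 2: ...`
def bfsScan (H W : Int) (g : List (List Int)) : List (List Int) :=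
  (List.range g.length).foldl (fun (v : List (List Int)) (idx : Nat) =>
    (List.range ((v.getD idx []).length)).foldl (fun (v : List (List Int)) (jdx : Nat) =>
      if pvGet2 v (idx : Int) (jdx : Int) = some 2 then
        bfsLoop H W (2 * pvZeros v + 2) v [((idx : Int), (jdx : Int))]
      else v) v) g

-- A's final counting loops
def bfsCount (g : List (List Int)) : Int :=
  g.foldl (fun acc row => row.foldl (fun a j => if j = 0 then a + 1 else a) acc) 0

def bfs (maps : List (List Int)) (walls : List (List Int)) : Int :=
  let visited := pvPlaceWalls maps walls
  bfsCount (bfsScan (maps.length : Int) ((maps.headD []).length : Int) visited)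

-- ===== PORT B =====
-- body of B's `for ny, nx in ((y, x-1), (y, x+1), (y-1, x), (y+1, x))` over (visited, queue)
def bfsQStep (H W : Int) (st : List (List Int) × List (Int × Int)) (c : Int × Int) :
    List (List Int) × List (Int × Int) :=
  if 0 ≤ c.1 ∧ c.1 < H ∧ 0 ≤ c.2 ∧ c.2 < W then
    match pvGet2 st.1 c.1 c.2 with
    | some 0 => (pvSet2 st.1 c.1 c.2 2, st.2 ++ [c])
    | _ => st
  else st

-- B's `while i < len(queue)`; the unread prefix queue[:i] is dropped: popping the head = advancing i,
-- `queue.append` = append at the end — exact for the returned grid; fuel guards totality only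
def bfsQueue (H W : Int) : Nat → List (List Int) → List (Int × Int) → List (List Int)
  | 0, v, _ => v
  | _ + 1, v, [] => v
  | fuel + 1, v, (y, x) :: rest =>
    let st := [(y, x - 1), (y, x + 1), (y - 1, x), (y + 1, x)].foldl (bfsQStep H W) (v, rest)
    bfsQueue H W fuel st.1 st.2

-- B's `sum(1 for row in visited for c in row if c == 0)`
def altCount (g : List (List Int)) : Int :=
  ((g.flatMap (fun row => row.filter (fun c => c == 0))).map (fun _ => (1 : Int))).sum

def bfs_alt (maps : List (List Int)) (walls : List (List Int)) : Int :=
  let visited := pvPlaceWalls maps walls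
  let H : Int := (maps.length : Int)
  let W : Int := ((maps.headD []).length : Int)  -- len(maps[0]) if maps else 0
  let queue := (PySem.List.pyRange 0 H 1).flatMap (fun y =>
    (PySem.List.pyRange 0 W 1).flatMap (fun x =>
      if pvGet2 visited y x = some 2 then [(y, x)] else []))
  altCount (bfsQueue H W (2 * pvZeros visited + queue.length + 1) visited queue)

-- ===== PRECONDITION & SPEC =====
-- Pre_bfs excludes (a) ragged maps: A indexes every row by len(maps[0]), so a reachable short row
-- raises IndexError, and a virus sitting beyond column len(maps[0])-1 of a longer row is flooded by
-- A's enumerate scan but lies outside the problem's rectangular grid (an artefact of A's scan);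
-- (b) walls that are not length-≥2 rows of in-range (Python-wrap) indices, on which A raises.
def Pre_bfs (maps : List (List Int)) (walls : List (List Int)) : Prop :=
  (∀ row ∈ maps, row.length = (maps.headD []).length) ∧
  (∀ w ∈ walls, 2 ≤ w.length ∧
    (-(maps.length : Int) ≤ w.getD 0 0 ∧ w.getD 0 0 < (maps.length : Int)) ∧
    (-((maps.headD []).length : Int) ≤ w.getD 1 0 ∧ w.getD 1 0 < ((maps.headD []).length : Int)))
instance (maps : List (List Int)) (walls : List (List Int)) : Decidable (Pre_bfs maps walls) := by
  unfold Pre_bfs; infer_instance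

def pvWitness_bfs : List (List Int) × List (List Int) := ([[2, 0, 0], [0, 1, 0]], [[0, 1], [-1, -1]])

def Spec_bfs (maps : List (List Int)) (walls : List (List Int)) (out : Int) : Prop := out = bfs_alt maps walls
instance (maps : List (List Int)) (walls : List (List Int)) (out : Int) : Decidable (Spec_bfs maps walls out) := by unfold Spec_bfs; infer_instance

-- ===== CLAIM (what is proved, stated in full; the proofs are below) =====
def Claim_equal_bfs : Prop := ∀ (maps : List (List Int)) (walls : List (List Int)), Dom_bfs maps walls → Pre_bfs maps walls → Spec_bfs maps walls (bfs maps walls)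

-- ===== LEMMAS AND PROOFS =====

-- geometry / abstract flood layer
def GoodP (H W : Int) (p : Int × Int) : Prop := 0 ≤ p.1 ∧ p.1 < H ∧ 0 ≤ p.2 ∧ p.2 < W

def ShapeHW (H W : Int) (g : List (List Int)) : Prop :=
  ((g.length : Int) = H) ∧ ∀ row ∈ g, ((row.length : Int) = W)

def nbrsP (p : Int × Int) : List (Int × Int) :=
  [(p.1, p.2 - 1), (p.1, p.2 + 1), (p.1 - 1, p.2), (p.1 + 1, p.2)]

def cellOf (g : List (List Int)) (p : Int × Int) : Option Int := pvGet2 g p.1 p.2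

def SatP (H W : Int) (g : List (List Int)) (p : Int × Int) : Prop :=
  ∀ q ∈ nbrsP p, GoodP H W q → cellOf g q ≠ some 0

def StepR (g0 : List (List Int)) (H W : Int) (p q : Int × Int) : Prop :=
  q ∈ nbrsP p ∧ GoodP H W q ∧ cellOf g0 q = some 0

def InC (g0 : List (List Int)) (H W : Int) (p : Int × Int) : Prop :=
  ∃ s, GoodP H W s ∧ cellOf g0 s = some 2 ∧ Relation.ReflTransGen (StepR g0 H W) s p

def InvP (g0 : List (List Int)) (H W : Int) (v : List (List Int)) : Prop :=
  ShapeHW H W v ∧ ∀ p, GoodP H W p →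
    (cellOf v p = some 2 ∧ InC g0 H W p) ∨ cellOf v p = cellOf g0 p

def LEg (H W : Int) (v v' : List (List Int)) : Prop :=
  ∀ p, GoodP H W p → cellOf v' p = cellOf v p ∨ (cellOf v p = some 0 ∧ cellOf v' p = some 2)

def StackOK (g0 : List (List Int)) (H W : Int) (v : List (List Int)) (st : List (Int × Int)) : Prop :=
  ∀ p ∈ st, GoodP H W p ∧ cellOf v p = some 2 ∧ InC g0 H W p

def DoneP (g0 : List (List Int)) (H W : Int) (v : List (List Int)) : Prop :=
  ShapeHW H W v ∧ ∀ p, GoodP H W p →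
    (InC g0 H W p → cellOf v p = some 2) ∧ (¬ InC g0 H W p → cellOf v p = cellOf g0 p)

-- generic worklist step / loop (A = push-on-top, B = push-at-the-end)
def stepGen (push : List (Int × Int) → (Int × Int) → List (Int × Int)) (H W : Int)
    (st : List (List Int) × List (Int × Int)) (c : Int × Int) :
    List (List Int) × List (Int × Int) :=
  if 0 ≤ c.1 ∧ c.1 < H ∧ 0 ≤ c.2 ∧ c.2 < W then
    match pvGet2 st.1 c.1 c.2 with
    | some 0 => (pvSet2 st.1 c.1 c.2 2, push st.2 c)
    | _ => st
  else st

def loopGen (push : List (Int × Int) → (Int × Int) → List (Int × Int)) (H W : Int) :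
    Nat → List (List Int) → List (Int × Int) → List (List Int)
  | 0, v, _ => v
  | _ + 1, v, [] => v
  | fuel + 1, v, (y, x) :: rest =>
    let st := (nbrsP (y, x)).foldl (stepGen push H W) (v, rest)
    loopGen push H W fuel st.1 st.2

-- ----- bridging the ports to the generic loop -----
lemma nbrs_eq_map (y x : Int) : pvDirs.map (fun d => (y + d.1, x + d.2)) = nbrsP (y, x) := by
  simp [pvDirs, nbrsP, Prod.ext_iff]
  omega

lemma bfsLoop_eq_loopGen (H W : Int) :
    ∀ fuel v st, bfsLoop H W fuel v st = loopGen (fun l c => c :: l) H W fuel v st := by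
  intro fuel
  induction fuel with
  | zero => intro v st; rfl
  | succ n ih =>
    intro v st
    match st with
    | [] => rfl
    | (y, x) :: rest =>
      have hstep : bfsStep H W y x = fun st d => stepGen (fun l c => c :: l) H W st (y + d.1, x + d.2) := by
        funext st d; rfl
      simp only [bfsLoop, loopGen, ← nbrs_eq_map y x, List.foldl_map, hstep]
      exact ih _ _

lemma bfsQueue_eq_loopGen (H W : Int) :
    ∀ fuel v st, bfsQueue H W fuel v st = loopGen (fun l c => l ++ [c]) H W fuel v st := by
  intro fuel
  induction fuel with
  | zero => intro v st; rfl
  | succ n ih =>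
    intro v st
    match st with
    | [] => rfl
    | (y, x) :: rest =>
      have hq : bfsQStep H W = stepGen (fun l c => l ++ [c]) H W := by
        funext st c; rfl
      simp only [bfsQueue, loopGen, nbrsP, hq]
      exact ih _ _

-- ----- grid primitive lemmas -----
lemma pvGet2_nonneg (g : List (List Int)) (y x : Int) (hy : 0 ≤ y) (hx : 0 ≤ x) :
    pvGet2 g y x = (g[y.toNat]?.getD [])[x.toNat]? := by
  unfold pvGet2
  rw [PySem.List.pyGet?_of_nonneg _ hy]
  cases hrow : g[y.toNat]? with
  | none => simp
  | some row => simp [PySem.List.pyGet?_of_nonneg _ hx]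

lemma cellOf_shape (H W : Int) (g : List (List Int)) (p : Int × Int)
    (hs : ShapeHW H W g) (hp : GoodP H W p) :
    p.1.toNat < g.length ∧ p.2.toNat < (g.getD p.1.toNat []).length ∧
      cellOf g p = some ((g.getD p.1.toNat []).getD p.2.toNat 0) := by
  obtain ⟨hlen, hrows⟩ := hs
  obtain ⟨h1, h2, h3, h4⟩ := hp
  have hy : p.1.toNat < g.length := by omega
  have hrowmem : g.getD p.1.toNat [] ∈ g := by
    rw [List.getD_eq_getElem g [] hy]; exact List.getElem_mem hy
  have hWr := hrows _ hrowmem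
  have hx : p.2.toNat < (g.getD p.1.toNat []).length := by omega
  refine ⟨hy, hx, ?_⟩
  unfold cellOf
  rw [pvGet2_nonneg g p.1 p.2 h1 h3]
  rw [List.getElem?_eq_getElem hy]
  simp only [Option.getD_some]
  rw [List.getElem?_eq_getElem (by rw [← List.getD_eq_getElem g [] hy]; exact hx)]
  congr 1
  rw [List.getD_eq_getElem _ _ hx]
  congr 1
  exact (List.getD_eq_getElem g [] hy).symm

lemma pvSet2_good (H W : Int) (g : List (List Int)) (y x a : Int)
    (hs : ShapeHW H W g) (hp : GoodP H W (y, x)) :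
    pvSet2 g y x a = g.set y.toNat ((g.getD y.toNat []).set x.toNat a) := by
  obtain ⟨hlen, hrows⟩ := hs
  obtain ⟨h1, h2, h3, h4⟩ := hp
  have hy : pvNorm g.length y = some y.toNat := by
    unfold pvNorm
    rw [if_pos h1, if_pos (by omega)]
  have hrowmem : g.getD y.toNat [] ∈ g := by
    have hy' : y.toNat < g.length := by omega
    rw [List.getD_eq_getElem g [] hy']; exact List.getElem_mem hy'
  have hWr := hrows _ hrowmem
  have hx : pvNorm (g.getD y.toNat []).length x = some x.toNat := by
    unfold pvNorm
    rw [if_pos h3, if_pos (by omega)]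
  unfold pvSet2
  simp only [hy, hx]

lemma shape_pvSet2 (H W : Int) (g : List (List Int)) (y x a : Int)
    (hs : ShapeHW H W g) (hp : GoodP H W (y, x)) :
    ShapeHW H W (pvSet2 g y x a) := by
  rw [pvSet2_good H W g y x a hs hp]
  obtain ⟨hlen, hrows⟩ := hs
  refine ⟨by simpa using hlen, ?_⟩
  intro row hrow
  rcases List.mem_or_eq_of_mem_set hrow with h | h
  · exact hrows _ h
  · subst h
    rw [List.length_set]
    obtain ⟨h1, h2, h3, h4⟩ := hp
    have hy' : y.toNat < g.length := by omega
    have : g.getD y.toNat [] ∈ g := by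
      rw [List.getD_eq_getElem g [] hy']; exact List.getElem_mem hy'
    exact hrows _ this

lemma cell_set_same (H W : Int) (g : List (List Int)) (y x a : Int)
    (hs : ShapeHW H W g) (hp : GoodP H W (y, x)) :
    cellOf (pvSet2 g y x a) (y, x) = some a := by
  obtain ⟨hy, hx, -⟩ := cellOf_shape H W g (y, x) hs hp
  rw [pvSet2_good H W g y x a hs hp]
  unfold cellOf
  rw [pvGet2_nonneg _ _ _ hp.1 hp.2.2.1]
  simp only
  rw [List.getElem?_set_self (by simpa using hy)]
  simp only [Option.getD_some]
  rw [List.getElem?_set_self (by simpa using hx)]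

lemma cell_set_other (H W : Int) (g : List (List Int)) (c : Int × Int) (a : Int) (p : Int × Int)
    (hs : ShapeHW H W g) (hc : GoodP H W c) (hp : GoodP H W p) (hne : p ≠ c) :
    cellOf (pvSet2 g c.1 c.2 a) p = cellOf g p := by
  obtain ⟨hcy, hcx, -⟩ := cellOf_shape H W g c hs hc
  rw [pvSet2_good H W g c.1 c.2 a hs (by exact hc)]
  unfold cellOf
  rw [pvGet2_nonneg _ _ _ hp.1 hp.2.2.1, pvGet2_nonneg _ _ _ hp.1 hp.2.2.1]
  by_cases hy : p.1.toNat = c.1.toNat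
  · have hy' : p.1 = c.1 := by
      have := hp.1; have := hc.1; omega
    have hxne : p.2.toNat ≠ c.2.toNat := by
      have h2 := hp.2.2.1; have h2' := hc.2.2.1
      intro hco
      exact hne (Prod.ext hy' (by omega))
    rw [hy]
    rw [List.getElem?_set_self (by simpa using hcy)]
    simp only [Option.getD_some]
    rw [List.getElem?_set_ne (by omega)]
    rw [List.getElem?_eq_getElem hcy]
    simp only [Option.getD_some]
    rw [List.getD_eq_getElem g [] hcy]
  · rw [List.getElem?_set_ne (by omega)]

lemma sum_set_nat (l : List Nat) (n : Nat) (a : Nat) (h : n < l.length) :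
    (l.set n a).sum + l[n] = l.sum + a := by
  induction l generalizing n with
  | nil => simp at h
  | cons x xs ih =>
    cases n with
    | zero => simp [List.set]; omega
    | succ m =>
      simp only [List.set, List.sum_cons, List.getElem_cons_succ]
      have := ih m (by simpa using h)
      omega

lemma count_set_zero (row : List Int) (i : Nat) (h : i < row.length) (h0 : row[i] = 0) :
    (row.set i 2).count 0 + 1 = row.count 0 := by
  induction row generalizing i with
  | nil => simp at h
  | cons x xs ih =>
    cases i with
    | zero =>
      simp at h0
      subst h0
      simp
    | succ m =>
      simp only [List.set, List.count_cons]
      have := ih m (by simpa using h) (by simpa using h0)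
      omega

lemma pvZeros_set_lt (H W : Int) (g : List (List Int)) (c : Int × Int)
    (hs : ShapeHW H W g) (hc : GoodP H W c) (h0 : cellOf g c = some 0) :
    pvZeros (pvSet2 g c.1 c.2 2) < pvZeros g := by
  obtain ⟨hcy, hcx, hcell⟩ := cellOf_shape H W g c hs hc
  rw [pvSet2_good H W g c.1 c.2 2 hs (by exact hc)]
  have h0 : (g.getD c.1.toNat [])[c.2.toNat] = 0 := by
    rw [hcell] at h0; rw [← List.getD_eq_getElem _ _ hcx]
    exact Option.some.inj h0
  unfold pvZeros
  rw [List.map_set]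
  have hmlen : c.1.toNat < (g.map (fun r => r.count 0)).length := by simpa using hcy
  have hsum := sum_set_nat (g.map (fun r => r.count 0)) c.1.toNat
    (((g.getD c.1.toNat []).set c.2.toNat 2).count 0) hmlen
  have hcnt := count_set_zero (g.getD c.1.toNat []) c.2.toNat hcx h0
  have hget : (g.map (fun r => r.count 0))[c.1.toNat] = (g.getD c.1.toNat []).count 0 := by
    rw [List.getElem_map]
    congr 1
    exact (List.getD_eq_getElem g [] hcy).symm
  rw [hget] at hsum
  omega

-- ----- order lemmas -----
lemma LEg_refl (H W : Int) (v : List (List Int)) : LEg H W v v := by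
  intro p _; left; rfl

lemma LEg_trans (H W : Int) (u v w : List (List Int)) (h1 : LEg H W u v) (h2 : LEg H W v w) :
    LEg H W u w := by
  intro p hp
  rcases h1 p hp with e1 | ⟨z1, t1⟩ <;> rcases h2 p hp with e2 | ⟨z2, t2⟩
  · left; exact e2.trans e1
  · right; exact ⟨e1 ▸ z2, t2⟩
  · right; exact ⟨z1, e2.trans t1⟩
  · rw [t1] at z2; exact absurd z2 (by decide)

lemma ne_zero_mono (H W : Int) (v v' : List (List Int)) (p : Int × Int)
    (h : LEg H W v v') (hp : GoodP H W p) (hz : cellOf v p ≠ some 0) : cellOf v' p ≠ some 0 := by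
  rcases h p hp with e | ⟨z, t⟩
  · rw [e]; exact hz
  · rw [t]; decide

lemma Sat_mono (H W : Int) (v v' : List (List Int)) (p : Int × Int)
    (h : LEg H W v v') (hs : SatP H W v p) : SatP H W v' p := by
  intro q hq hgq
  exact ne_zero_mono H W v v' q h hgq (hs q hq hgq)

-- ----- stepGen case analysis -----
lemma stepGen_not_good (push : List (Int × Int) → (Int × Int) → List (Int × Int)) (H W : Int)
    (st : List (List Int) × List (Int × Int)) (c : Int × Int) (h : ¬ GoodP H W c) :
    stepGen push H W st c = st := by
  unfold stepGen
  rw [if_neg (by exact h)]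

lemma stepGen_zero (push : List (Int × Int) → (Int × Int) → List (Int × Int)) (H W : Int)
    (st : List (List Int) × List (Int × Int)) (c : Int × Int) (hg : GoodP H W c)
    (h : pvGet2 st.1 c.1 c.2 = some 0) :
    stepGen push H W st c = (pvSet2 st.1 c.1 c.2 2, push st.2 c) := by
  unfold stepGen
  rw [if_pos (by exact hg)]
  simp only [h]

lemma stepGen_skip (push : List (Int × Int) → (Int × Int) → List (Int × Int)) (H W : Int)
    (st : List (List Int) × List (Int × Int)) (c : Int × Int)
    (h : pvGet2 st.1 c.1 c.2 ≠ some 0) :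
    stepGen push H W st c = st := by
  unfold stepGen
  split
  · split
    · rename_i heq
      exact absurd heq h
    · rfl
  · rfl

-- ----- the generic fold/loop specification -----
lemma foldStep_spec (g0 : List (List Int)) (H W : Int)
    (push : List (Int × Int) → (Int × Int) → List (Int × Int))
    (hmem : ∀ p l c, p ∈ push l c ↔ p = c ∨ p ∈ l)
    (hlen : ∀ l c, (push l c).length = l.length + 1)
    (y x : Int) (hyx : InC g0 H W (y, x)) :
    ∀ (cs : List (Int × Int)) (st : List (List Int) × List (Int × Int)),
      (∀ c ∈ cs, c ∈ nbrsP (y, x)) →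
      InvP g0 H W st.1 → StackOK g0 H W st.1 st.2 →
      InvP g0 H W (cs.foldl (stepGen push H W) st).1 ∧
      LEg H W st.1 (cs.foldl (stepGen push H W) st).1 ∧
      StackOK g0 H W (cs.foldl (stepGen push H W) st).1 (cs.foldl (stepGen push H W) st).2 ∧
      (∀ p ∈ st.2, p ∈ (cs.foldl (stepGen push H W) st).2) ∧
      2 * pvZeros (cs.foldl (stepGen push H W) st).1 + (cs.foldl (stepGen push H W) st).2.length ≤
        2 * pvZeros st.1 + st.2.length ∧
      (∀ p, GoodP H W p → cellOf (cs.foldl (stepGen push H W) st).1 p = some 2 →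
        cellOf st.1 p = some 2 ∨ p ∈ (cs.foldl (stepGen push H W) st).2) ∧
      pvZeros (cs.foldl (stepGen push H W) st).1 ≤ pvZeros st.1 ∧
      (∀ c ∈ cs, GoodP H W c → cellOf (cs.foldl (stepGen push H W) st).1 c ≠ some 0) := by
  intro cs
  induction cs with
  | nil =>
    intro st _ hInv hstk
    exact ⟨hInv, LEg_refl H W st.1, hstk, fun p hp => hp, le_refl _,
      fun p _ h2 => Or.inl h2, le_refl _, by simp⟩
  | cons c cs ih =>
    intro st hcs hInv hstk
    have hcn : c ∈ nbrsP (y, x) := hcs c (by simp)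
    -- one-step facts for st1 := stepGen push H W st c
    have hone : InvP g0 H W (stepGen push H W st c).1 ∧
        LEg H W st.1 (stepGen push H W st c).1 ∧
        StackOK g0 H W (stepGen push H W st c).1 (stepGen push H W st c).2 ∧
        (∀ p ∈ st.2, p ∈ (stepGen push H W st c).2) ∧
        2 * pvZeros (stepGen push H W st c).1 + (stepGen push H W st c).2.length ≤
          2 * pvZeros st.1 + st.2.length ∧
        (∀ p, GoodP H W p → cellOf (stepGen push H W st c).1 p = some 2 →
          cellOf st.1 p = some 2 ∨ p ∈ (stepGen push H W st c).2) ∧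
        pvZeros (stepGen push H W st c).1 ≤ pvZeros st.1 ∧
        (GoodP H W c → cellOf (stepGen push H W st c).1 c ≠ some 0) := by
      by_cases hg : GoodP H W c
      · by_cases h0 : pvGet2 st.1 c.1 c.2 = some 0
        · rw [stepGen_zero push H W st c hg h0]
          have hsh := hInv.1
          have hcell0 : cellOf st.1 c = some 0 := h0
          have hg0c : cellOf g0 c = some 0 := by
            rcases hInv.2 c hg with ⟨h2, -⟩ | he
            · rw [hcell0] at h2; exact absurd h2 (by decide)
            · rw [← he]; exact hcell0
          have hInCc : InC g0 H W c := by
            obtain ⟨s, hs2, hsc, hpath⟩ := hyx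
            exact ⟨s, hs2, hsc, hpath.tail ⟨hcn, hg, hg0c⟩⟩
          have hsame : cellOf (pvSet2 st.1 c.1 c.2 2) c = some 2 := by
            have := cell_set_same H W st.1 c.1 c.2 2 hsh (by exact hg)
            exact this
          have hother : ∀ p, GoodP H W p → p ≠ c →
              cellOf (pvSet2 st.1 c.1 c.2 2) p = cellOf st.1 p := fun p hp hne =>
            cell_set_other H W st.1 c 2 p hsh hg hp hne
          refine ⟨⟨shape_pvSet2 H W st.1 c.1 c.2 2 hsh (by exact hg), ?_⟩, ?_, ?_, ?_, ?_, ?_, ?_, ?_⟩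
          · intro p hp
            by_cases hpc : p = c
            · subst hpc; exact Or.inl ⟨hsame, hInCc⟩
            · rw [hother p hp hpc]; exact hInv.2 p hp
          · intro p hp
            by_cases hpc : p = c
            · subst hpc; exact Or.inr ⟨hcell0, hsame⟩
            · exact Or.inl (hother p hp hpc)
          · intro p hpmem
            rcases (hmem p st.2 c).1 hpmem with hpc | hpold
            · subst hpc; exact ⟨hg, hsame, hInCc⟩
            · obtain ⟨hpg, hp2, hpInC⟩ := hstk p hpold
              have hpne : p ≠ c := by
                intro he; rw [he, hcell0] at hp2; exact absurd hp2 (by decide)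
              exact ⟨hpg, by rw [hother p hpg hpne]; exact hp2, hpInC⟩
          · intro p hpold; exact (hmem p st.2 c).2 (Or.inr hpold)
          · have hlt := pvZeros_set_lt H W st.1 c hsh hg hcell0
            have := hlen st.2 c
            show 2 * pvZeros (pvSet2 st.1 c.1 c.2 2) + (push st.2 c).length ≤ _
            omega
          · intro p hp h2
            by_cases hpc : p = c
            · subst hpc; exact Or.inr ((hmem p st.2 p).2 (Or.inl rfl))
            · rw [hother p hp hpc] at h2; exact Or.inl h2
          · exact le_of_lt (pvZeros_set_lt H W st.1 c hsh hg hcell0)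
          · intro _; rw [hsame]; decide
        · rw [stepGen_skip push H W st c h0]
          exact ⟨hInv, LEg_refl H W st.1, hstk, fun p hp => hp, le_refl _,
            fun p _ h2 => Or.inl h2, le_refl _, fun _ => h0⟩
      · rw [stepGen_not_good push H W st c hg]
        exact ⟨hInv, LEg_refl H W st.1, hstk, fun p hp => hp, le_refl _,
          fun p _ h2 => Or.inl h2, le_refl _, fun hg' => absurd hg' hg⟩
    obtain ⟨hI1, hL1, hS1, hM1, hZ1, hK1, hz1, hc1⟩ := hone
    have hrest := ih (stepGen push H W st c) (fun c' hc' => hcs c' (by simp [hc']))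
      hI1 hS1
    obtain ⟨hI2, hL2, hS2, hM2, hZ2, hK2, hz2, hc2⟩ := hrest
    simp only [List.foldl_cons]
    refine ⟨hI2, LEg_trans H W _ _ _ hL1 hL2, hS2, ?_, by omega, ?_, le_trans hz2 hz1, ?_⟩
    · intro p hp; exact hM2 p (hM1 p hp)
    · intro p hp h2
      rcases hK2 p hp h2 with h2' | hmem2
      · rcases hK1 p hp h2' with h2'' | hmem1
        · exact Or.inl h2''
        · exact Or.inr (hM2 p hmem1)
      · exact Or.inr hmem2
    · intro c' hc' hgc'
      rcases (List.mem_cons).1 hc' with rfl | hmemc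
      · exact ne_zero_mono H W _ _ c' hL2 hgc' (hc1 hgc')
      · exact hc2 c' hmemc hgc'

lemma loopGen_spec (g0 : List (List Int)) (H W : Int)
    (push : List (Int × Int) → (Int × Int) → List (Int × Int))
    (hmem : ∀ p l c, p ∈ push l c ↔ p = c ∨ p ∈ l)
    (hlen : ∀ l c, (push l c).length = l.length + 1) :
    ∀ (fuel : Nat) (v : List (List Int)) (stack : List (Int × Int)),
      InvP g0 H W v → StackOK g0 H W v stack →
      2 * pvZeros v + stack.length < fuel →
      InvP g0 H W (loopGen push H W fuel v stack) ∧
      LEg H W v (loopGen push H W fuel v stack) ∧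
      (∀ p ∈ stack, SatP H W (loopGen push H W fuel v stack) p) ∧
      (∀ p, GoodP H W p → cellOf (loopGen push H W fuel v stack) p = some 2 →
        cellOf v p = some 2 ∨ SatP H W (loopGen push H W fuel v stack) p) ∧
      pvZeros (loopGen push H W fuel v stack) ≤ pvZeros v := by
  intro fuel
  induction fuel with
  | zero => intro v stack _ _ hm; omega
  | succ n ih =>
    intro v stack hInv hstk hm
    match stack with
    | [] =>
      simp only [loopGen]
      exact ⟨hInv, LEg_refl H W v, by simp, fun p _ h2 => Or.inl h2, le_refl _⟩
    | (y, x) :: rest =>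
      obtain ⟨hGyx, h2yx, hInCyx⟩ := hstk (y, x) (by simp)
      have hF := foldStep_spec g0 H W push hmem hlen y x hInCyx (nbrsP (y, x)) (v, rest)
        (fun c hc => hc) hInv (fun p hp => hstk p (by simp [hp]))
      obtain ⟨hI1, hL1, hS1, hM1, hZ1, hK1, hz1, hc1⟩ := hF
      have hm' : 2 * pvZeros ((nbrsP (y, x)).foldl (stepGen push H W) (v, rest)).1 +
          ((nbrsP (y, x)).foldl (stepGen push H W) (v, rest)).2.length < n := by
        simp only [List.length_cons] at hm
        have hZ1' : 2 * pvZeros ((nbrsP (y, x)).foldl (stepGen push H W) (v, rest)).1 +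
            ((nbrsP (y, x)).foldl (stepGen push H W) (v, rest)).2.length ≤
            2 * pvZeros v + rest.length := hZ1
        omega
      have hR := ih ((nbrsP (y, x)).foldl (stepGen push H W) (v, rest)).1
        ((nbrsP (y, x)).foldl (stepGen push H W) (v, rest)).2 hI1 hS1 hm'
      obtain ⟨hI2, hL2, hS2, hK2, hz2⟩ := hR
      simp only [loopGen]
      have hSatyx : SatP H W ((nbrsP (y, x)).foldl (stepGen push H W) (v, rest)).1 (y, x) :=
        fun q hq hgq => hc1 q hq hgq
      refine ⟨hI2, LEg_trans H W _ _ _ hL1 hL2, ?_, ?_, le_trans hz2 hz1⟩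
      · intro p hp
        rcases (List.mem_cons).1 hp with rfl | hpr
        · exact Sat_mono H W _ _ _ hL2 hSatyx
        · exact hS2 p (hM1 p hpr)
      · intro p hp h2
        rcases hK2 p hp h2 with h2' | hsat
        · rcases hK1 p hp h2' with h2'' | hmem1
          · exact Or.inl h2''
          · exact Or.inr (hS2 p hmem1)
        · exact Or.inr hsat

-- ----- A's per-cell action -----
def cellA (H W : Int) (v : List (List Int)) (y x : Int) : List (List Int) :=
  if pvGet2 v y x = some 2 then bfsLoop H W (2 * pvZeros v + 2) v [(y, x)] else v

lemma cellA_spec (g0 : List (List Int)) (H W : Int) (v : List (List Int)) (y x : Int)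
    (hv : InvP g0 H W v) (hg : GoodP H W (y, x)) :
    InvP g0 H W (cellA H W v y x) ∧ LEg H W v (cellA H W v y x) ∧
    (cellOf v (y, x) = some 2 → SatP H W (cellA H W v y x) (y, x)) ∧
    (∀ p, GoodP H W p → cellOf (cellA H W v y x) p = some 2 →
      cellOf v p = some 2 ∨ SatP H W (cellA H W v y x) p) := by
  unfold cellA
  by_cases hcond : pvGet2 v y x = some 2
  · rw [if_pos hcond]
    have hInC : InC g0 H W (y, x) := by
      rcases hv.2 (y, x) hg with ⟨-, hc⟩ | he
      · exact hc
      · exact ⟨(y, x), hg, by rw [← he]; exact hcond, Relation.ReflTransGen.refl⟩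
    rw [bfsLoop_eq_loopGen H W]
    have hL := loopGen_spec g0 H W (fun l c => c :: l) (fun p l c => by simp)
      (fun l c => by simp) (2 * pvZeros v + 2) v [(y, x)] hv
      (by intro p hp; simp at hp; subst hp; exact ⟨hg, hcond, hInC⟩)
      (by simp)
    obtain ⟨hI, hLe, hSat, hMk, -⟩ := hL
    exact ⟨hI, hLe, fun _ => hSat (y, x) (by simp), hMk⟩
  · rw [if_neg hcond]
    exact ⟨hv, LEg_refl H W v, fun h2 => absurd h2 hcond, fun p _ h2 => Or.inl h2⟩

lemma scan_go (g0 : List (List Int)) (H W : Int) :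
    ∀ (cells : List (Int × Int)) (v : List (List Int)),
      (∀ c ∈ cells, GoodP H W c) → InvP g0 H W v →
      (∀ p, GoodP H W p → cellOf v p = some 2 → SatP H W v p ∨ p ∈ cells) →
      InvP g0 H W (cells.foldl (fun v c => cellA H W v c.1 c.2) v) ∧
      LEg H W v (cells.foldl (fun v c => cellA H W v c.1 c.2) v) ∧
      (∀ p, GoodP H W p → cellOf (cells.foldl (fun v c => cellA H W v c.1 c.2) v) p = some 2 →
        SatP H W (cells.foldl (fun v c => cellA H W v c.1 c.2) v) p) := by
  intro cells
  induction cells with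
  | nil =>
    intro v _ hv hcov
    refine ⟨hv, LEg_refl H W v, ?_⟩
    intro p hp h2
    rcases hcov p hp h2 with hsat | habs
    · exact hsat
    · simp at habs
  | cons c cs ih =>
    intro v hgood hv hcov
    have hgc : GoodP H W c := hgood c (by simp)
    have hca := cellA_spec g0 H W v c.1 c.2 hv hgc
    obtain ⟨hI1, hL1, hSatc, hMk1⟩ := hca
    have hcov1 : ∀ p, GoodP H W p → cellOf (cellA H W v c.1 c.2) p = some 2 →
        SatP H W (cellA H W v c.1 c.2) p ∨ p ∈ cs := by
      intro p hp h2
      rcases hMk1 p hp h2 with h2v | hsat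
      · rcases hcov p hp h2v with hsat | hmemc
        · exact Or.inl (Sat_mono H W _ _ p hL1 hsat)
        · rcases (List.mem_cons).1 hmemc with rfl | hmemr
          · exact Or.inl (hSatc h2v)
          · exact Or.inr hmemr
      · exact Or.inl hsat
    have hrest := ih (cellA H W v c.1 c.2) (fun c' hc' => hgood c' (by simp [hc'])) hI1 hcov1
    obtain ⟨hI2, hL2, hS2⟩ := hrest
    simp only [List.foldl_cons]
    exact ⟨hI2, LEg_trans H W _ _ _ hL1 hL2, hS2⟩

lemma fold_cellA_inv (g0 : List (List Int)) (H W : Int) :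
    ∀ (cells : List (Int × Int)) (v : List (List Int)),
      (∀ c ∈ cells, GoodP H W c) → InvP g0 H W v →
      InvP g0 H W (cells.foldl (fun v c => cellA H W v c.1 c.2) v) := by
  intro cells
  induction cells with
  | nil => intro v _ hv; exact hv
  | cons c cs ih =>
    intro v hgood hv
    have hca := cellA_spec g0 H W v c.1 c.2 hv (hgood c (by simp))
    simp only [List.foldl_cons]
    exact ih _ (fun c' hc' => hgood c' (by simp [hc'])) hca.1

-- A's nested scan equals the flat fold over all (row, column) pairs
lemma scanRows_eq (g0 : List (List Int)) (H W : Int) :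
    ∀ (idxs : List Nat) (v : List (List Int)), (∀ i ∈ idxs, i < g0.length) →
      ((g0.length : Int) = H) → InvP g0 H W v →
      idxs.foldl (fun (v : List (List Int)) (idx : Nat) =>
        (List.range ((v.getD idx []).length)).foldl (fun (v : List (List Int)) (jdx : Nat) =>
          if pvGet2 v (idx : Int) (jdx : Int) = some 2 then
            bfsLoop H W (2 * pvZeros v + 2) v [((idx : Int), (jdx : Int))]
          else v) v) v
      = (idxs.flatMap (fun (idx : Nat) =>
          (List.range W.toNat).map (fun (jdx : Nat) => ((idx : Int), (jdx : Int))))).foldl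
          (fun v c => cellA H W v c.1 c.2) v := by
  intro idxs
  induction idxs with
  | nil => intro v _ _ _; rfl
  | cons i rest ih =>
    intro v hidx hH hv
    have hi : i < g0.length := hidx i (by simp)
    have hsh := hv.1
    have hrowmem : v.getD i [] ∈ v := by
      have hi' : i < v.length := by
        have := hsh.1; omega
      rw [List.getD_eq_getElem v [] hi']; exact List.getElem_mem hi'
    have hrowlen : (v.getD i []).length = W.toNat := by
      have := hsh.2 _ hrowmem; omega
    have hW : 0 ≤ W := by
      have := hsh.2 _ hrowmem; omega
    have hGoods : ∀ c ∈ (List.range W.toNat).map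
        (fun (jdx : Nat) => ((i : Int), (jdx : Int))), GoodP H W c := by
      intro c hc
      simp only [List.mem_map, List.mem_range] at hc
      obtain ⟨j, hj, rfl⟩ := hc
      exact ⟨by omega, by omega, by omega, by omega⟩
    have hinner : (List.range ((v.getD i []).length)).foldl (fun (v : List (List Int)) (jdx : Nat) =>
          if pvGet2 v (i : Int) (jdx : Int) = some 2 then
            bfsLoop H W (2 * pvZeros v + 2) v [((i : Int), (jdx : Int))]
          else v) v
        = ((List.range W.toNat).map (fun (jdx : Nat) => ((i : Int), (jdx : Int)))).foldl
            (fun v c => cellA H W v c.1 c.2) v := by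
      rw [hrowlen, List.foldl_map]
      rfl
    simp only [List.foldl_cons, List.flatMap_cons, List.foldl_append]
    rw [hinner]
    exact ih _ (fun i' hi' => hidx i' (by simp [hi'])) hH
      (fold_cellA_inv g0 H W _ _ hGoods hv)

lemma pvNorm_lt (n : Nat) (i : Int) (j : Nat) (h : pvNorm n i = some j) : j < n := by
  unfold pvNorm at h
  split_ifs at h <;> simp_all <;> omega

lemma shape_pvSet2_any (H W : Int) (g : List (List Int)) (y x a : Int)
    (hs : ShapeHW H W g) : ShapeHW H W (pvSet2 g y x a) := by
  unfold pvSet2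
  split
  · exact hs
  · rename_i yi hyi
    split
    · exact hs
    · rename_i xi hxi
      refine ⟨by rw [List.length_set]; exact hs.1, ?_⟩
      intro row hrow
      rcases List.mem_or_eq_of_mem_set hrow with h | h
      · exact hs.2 _ h
      · subst h
        rw [List.length_set]
        have hylt := pvNorm_lt _ _ _ hyi
        apply hs.2
        rw [List.getD_eq_getElem g [] hylt]
        exact List.getElem_mem hylt

lemma done_of_sat (g0 : List (List Int)) (H W : Int) (v : List (List Int))
    (hv : InvP g0 H W v) (hle : LEg H W g0 v)
    (hsat : ∀ p, GoodP H W p → cellOf v p = some 2 → SatP H W v p) :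
    DoneP g0 H W v := by
  refine ⟨hv.1, ?_⟩
  intro p hp
  constructor
  · rintro ⟨s, hGs, hs2, hpath⟩
    have hall : ∀ q, Relation.ReflTransGen (StepR g0 H W) s q →
        GoodP H W q ∧ cellOf v q = some 2 := by
      intro q hq
      induction hq with
      | refl =>
        refine ⟨hGs, ?_⟩
        rcases hle s hGs with e | ⟨-, t⟩
        · rw [e]; exact hs2
        · exact t
      | tail hq hstep ih =>
        obtain ⟨hmemn, hGr, hg0r⟩ := hstep
        refine ⟨hGr, ?_⟩
        have hne0 := (hsat _ ih.1 ih.2) _ hmemn hGr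
        rcases hv.2 _ hGr with ⟨h2, -⟩ | he
        · exact h2
        · rw [he] at hne0; exact absurd hg0r hne0
    exact (hall p hpath).2
  · intro hnc
    rcases hv.2 p hp with ⟨-, hc⟩ | he
    · exact absurd hc hnc
    · exact he

lemma cell_nat (g : List (List Int)) (i j : Nat) (hi : i < g.length) (hj : j < g[i].length) :
    cellOf g ((i : Int), (j : Int)) = some (g[i][j]) := by
  unfold cellOf
  rw [pvGet2_nonneg _ _ _ (Int.natCast_nonneg i) (Int.natCast_nonneg j)]
  simp only [Int.toNat_natCast]
  rw [List.getElem?_eq_getElem hi]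
  simp only [Option.getD_some]
  rw [List.getElem?_eq_getElem hj]

lemma done_unique (g0 : List (List Int)) (H W : Int) (v1 v2 : List (List Int))
    (h1 : DoneP g0 H W v1) (h2 : DoneP g0 H W v2) : v1 = v2 := by
  obtain ⟨⟨hl1, hr1⟩, hp1⟩ := h1
  obtain ⟨⟨hl2, hr2⟩, hp2⟩ := h2
  have hlen : v1.length = v2.length := by omega
  apply List.ext_getElem hlen
  intro i hi1 hi2
  have hw1 : (v1[i].length : Int) = W := hr1 _ (List.getElem_mem hi1)
  have hw2 : (v2[i].length : Int) = W := hr2 _ (List.getElem_mem hi2)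
  apply List.ext_getElem (by omega)
  intro j hj1 hj2
  have hgood : GoodP H W ((i : Int), (j : Int)) := ⟨by omega, by omega, by omega, by omega⟩
  have c1 := cell_nat v1 i j hi1 hj1
  have c2 := cell_nat v2 i j hi2 hj2
  by_cases hc : InC g0 H W ((i : Int), (j : Int))
  · have e1 := (hp1 _ hgood).1 hc
    have e2 := (hp2 _ hgood).1 hc
    rw [c1] at e1
    rw [c2] at e2
    rw [Option.some.inj e1, Option.some.inj e2]
  · have e1 := (hp1 _ hgood).2 hc
    have e2 := (hp2 _ hgood).2 hc
    rw [c1] at e1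
    rw [c2] at e2
    rw [← e2] at e1
    exact Option.some.inj e1

lemma rowfold_count (row : List Int) :
    ∀ acc : Int, row.foldl (fun a j => if j = 0 then a + 1 else a) acc
      = acc + ((row.count 0 : Nat) : Int) := by
  induction row with
  | nil => intro acc; simp
  | cons x xs ih =>
    intro acc
    by_cases hx : x = 0
    · subst hx
      simp only [List.foldl_cons, ih, List.count_cons]
      simp
      omega
    · simp only [List.foldl_cons, if_neg hx, ih, List.count_cons]
      simp [hx]

lemma rowones_count (row : List Int) :
    ((row.filter (fun c => c == 0)).map (fun _ => (1 : Int))).sum = ((row.count 0 : Nat) : Int) := by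
  have hone : ∀ l : List Int, (l.map (fun _ => (1 : Int))).sum = (l.length : Int) := by
    intro l
    induction l with
    | nil => simp
    | cons a l _ =>
      simp
      omega
  rw [hone, ← List.countP_eq_length_filter]
  rfl

lemma count_eq (g : List (List Int)) : bfsCount g = altCount g := by
  unfold bfsCount altCount
  induction g with
  | nil => simp
  | cons r rs ih =>
    simp only [List.foldl_cons, List.flatMap_cons, List.map_append, List.sum_append]
    rw [rowfold_count r 0, rowones_count r]
    have haux : ∀ (l : List (List Int)) (a b : Int),
        l.foldl (fun acc row => row.foldl (fun a j => if j = 0 then a + 1 else a) acc) (a + b)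
        = a + l.foldl (fun acc row => row.foldl (fun a j => if j = 0 then a + 1 else a) acc) b := by
      intro l
      induction l with
      | nil => intro a b; simp
      | cons r' l' ih' =>
        intro a b
        simp only [List.foldl_cons]
        rw [rowfold_count r' (a + b), rowfold_count r' b, add_assoc, ih']
    rw [show ((0 : Int) + ((r.count 0 : Nat) : Int)) = (((r.count 0 : Nat) : Int) + 0) by ring,
      haux rs ((r.count 0 : Nat) : Int) 0]
    rw [ih]

lemma shape_placeWalls (maps walls : List (List Int))
    (hrect : ∀ row ∈ maps, row.length = (maps.headD []).length) :
    ShapeHW (maps.length : Int) ((maps.headD []).length : Int) (pvPlaceWalls maps walls) := by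
  unfold pvPlaceWalls
  have hstep : ∀ (ws : List (List Int)) (v : List (List Int)),
      ShapeHW (maps.length : Int) ((maps.headD []).length : Int) v →
      ShapeHW (maps.length : Int) ((maps.headD []).length : Int)
        (ws.foldl (fun v w =>
          match PySem.List.pyGet? w 0, PySem.List.pyGet? w 1 with
          | some a, some b => pvSet2 v a b 1
          | _, _ => v) v) := by
    intro ws
    induction ws with
    | nil => intro v hv; exact hv
    | cons w ws ih =>
      intro v hv
      simp only [List.foldl_cons]
      apply ih
      cases PySem.List.pyGet? w 0 with
      | none => exact hv
      | some a =>
        cases PySem.List.pyGet? w 1 with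
        | none => exact hv
        | some b => exact shape_pvSet2_any _ _ v a b 1 hv
  apply hstep
  exact ⟨rfl, fun row hr => by rw [hrect row hr]⟩

-- the queue comprehension of B, applied to the walled grid (definitionally the one in bfs_alt)
def srcQueue (g0 : List (List Int)) (H W : Int) : List (Int × Int) :=
  (PySem.List.pyRange 0 H 1).flatMap (fun y =>
    (PySem.List.pyRange 0 W 1).flatMap (fun x =>
      if pvGet2 g0 y x = some 2 then [(y, x)] else []))

lemma grids_eq (g0 : List (List Int)) (H W : Int) (hshape0 : ShapeHW H W g0) (hW : 0 ≤ W) :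
    bfsScan H W g0 =
      bfsQueue H W (2 * pvZeros g0 + (srcQueue g0 H W).length + 1) g0 (srcQueue g0 H W) := by
  have hInv0 : InvP g0 H W g0 := ⟨hshape0, fun p _ => Or.inr rfl⟩
  -- A's side reaches the closure
  have hscan := scanRows_eq g0 H W (List.range g0.length) g0
    (by intro i hi; simpa using hi) hshape0.1 hInv0
  have hGoodCells : ∀ c ∈ (List.range g0.length).flatMap (fun (idx : Nat) =>
      (List.range W.toNat).map (fun (jdx : Nat) => ((idx : Int), (jdx : Int)))), GoodP H W c := by
    intro c hc
    simp only [List.mem_flatMap, List.mem_map, List.mem_range] at hc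
    obtain ⟨i, hi, j, hj, rfl⟩ := hc
    have hlen := hshape0.1
    exact ⟨by omega, by omega, by omega, by omega⟩
  have hcov : ∀ p, GoodP H W p → cellOf g0 p = some 2 →
      SatP H W g0 p ∨ p ∈ (List.range g0.length).flatMap (fun (idx : Nat) =>
        (List.range W.toNat).map (fun (jdx : Nat) => ((idx : Int), (jdx : Int)))) := by
    intro p hp _
    right
    simp only [List.mem_flatMap, List.mem_map, List.mem_range]
    obtain ⟨h1, h2, h3, h4⟩ := hp
    have hlen := hshape0.1
    refine ⟨p.1.toNat, by omega, p.2.toNat, by omega, ?_⟩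
    ext
    · simp; omega
    · simp; omega
  have hscanspec := scan_go g0 H W _ g0 hGoodCells hInv0 hcov
  obtain ⟨hIA, hLA, hSA⟩ := hscanspec
  have hDoneA : DoneP g0 H W (bfsScan H W g0) := by
    unfold bfsScan
    rw [hscan]
    exact done_of_sat g0 H W _ hIA hLA hSA
  -- B's side reaches the closure
  have hqok : StackOK g0 H W g0 (srcQueue g0 H W) := by
    intro p hp
    unfold srcQueue at hp
    simp only [List.mem_flatMap] at hp
    obtain ⟨y, hy, x, hx, hpin⟩ := hp
    rw [PySem.List.mem_pyRange_one] at hy hx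
    by_cases hc : pvGet2 g0 y x = some 2
    · rw [if_pos hc] at hpin
      simp only [List.mem_singleton] at hpin
      subst hpin
      exact ⟨⟨hy.1, hy.2, hx.1, hx.2⟩, hc, ⟨(y, x), ⟨hy.1, hy.2, hx.1, hx.2⟩, hc,
        Relation.ReflTransGen.refl⟩⟩
    · rw [if_neg hc] at hpin
      simp at hpin
  have hloop := loopGen_spec g0 H W (fun l c => l ++ [c])
    (fun p l c => by simp [or_comm]) (fun l c => by simp)
    (2 * pvZeros g0 + (srcQueue g0 H W).length + 1) g0 (srcQueue g0 H W)
    hInv0 hqok (by omega)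
  obtain ⟨hIB, hLB, hSB, hKB, -⟩ := hloop
  have hDoneB : DoneP g0 H W (loopGen (fun l c => l ++ [c]) H W
      (2 * pvZeros g0 + (srcQueue g0 H W).length + 1) g0 (srcQueue g0 H W)) := by
    apply done_of_sat g0 H W _ hIB hLB
    intro p hp h2
    rcases hKB p hp h2 with h2g | hsat
    · apply hSB
      unfold srcQueue
      simp only [List.mem_flatMap]
      obtain ⟨h1, h2', h3, h4⟩ := hp
      refine ⟨p.1, ?_, p.2, ?_, ?_⟩
      · rw [PySem.List.mem_pyRange_one]; exact ⟨h1, h2'⟩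
      · rw [PySem.List.mem_pyRange_one]; exact ⟨h3, h4⟩
      · rw [if_pos (show pvGet2 g0 p.1 p.2 = some 2 from h2g)]
        simp
    · exact hsat
  rw [bfsQueue_eq_loopGen H W]
  exact done_unique g0 H W _ _ hDoneA hDoneB

-- ===== VERDICT (by name: the statement is the Claim_ definition above) =====
theorem bfs_spec : Claim_equal_bfs := by
  intro maps walls _ hpre
  unfold Spec_bfs
  have hshape0 := shape_placeWalls maps walls hpre.1
  show bfsCount (bfsScan (maps.length : Int) ((maps.headD []).length : Int)
      (pvPlaceWalls maps walls)) = _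
  rw [grids_eq (pvPlaceWalls maps walls) (maps.length : Int) ((maps.headD []).length : Int)
    hshape0 (Int.natCast_nonneg _), count_eq]
  rfl
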